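-- pv_equiv track=rewrite | github.com/beanstalk555/mobidisc | src/mobidisc.py | filter_cnf
-- ===== SOURCE A (Python) =====
-- def filter_cnf(mobidiscs_cnf: list[list[int]]) -> list[list[int]]:
--     unique_originals = []
--     seen = set()
--     for clause in mobidiscs_cnf:
--         s = frozenset(clause)
--         if s not in seen:
--             seen.add(s)
--             unique_originals.append(clause)
--
--     sets = [set(x) for x in unique_originals]
--     filtered = []
--     for i, si in enumerate(sets):
--         for j, sj in enumerate(sets):
--             if i == j:
--                 continue
--             if sj < si:
--                 break
--         else:
--             filtered.append(unique_originals[i])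
--     filtered = sorted(filtered, key=lambda clause: (len(clause), clause))
--     return filtered
-- ===== SOURCE B (Python) =====
-- def filter_cnf(mobidiscs_cnf: list[list[int]]) -> list[list[int]]:
--     # Dedup by canonical key (sorted tuple of distinct literals), keeping first originals.
--     uniq = {}
--     for clause in mobidiscs_cnf:
--         key = tuple(sorted(set(clause)))
--         if key not in uniq:
--             uniq[key] = clause
--     # Sweep keys in increasing size; a clause has a proper subset among the
--     # clauses iff it has one among the MINIMAL clauses already kept, so we
--     # only ever test against the antichain built so far.
--     minimal = []        # the minimal keys found so far (an antichain)
--     minimal_sets = []   # their element sets, built once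
--     for key in sorted(uniq, key=len):
--         ks = set(key)
--         if not any(ms < ks for ms in minimal_sets):
--             minimal.append(key)
--             minimal_sets.append(ks)
--     mins = set(minimal)
--     out = [clause for key, clause in uniq.items() if key in mins]
--     out.sort(key=lambda c: (len(c), c))
--     return out
-- ===== Notes on version B (the rewrite author's own statement) =====
-- stated objective: alternative
-- what changed: A tests every deduplicated clause against every other clause with an all-pairs proper-subset scan; B canonicalises each clause to a sorted tuple of its distinct literals, sweeps the clauses in increasing set size and tests each one only against the antichain of minimal clauses kept so far.
import Mathlib
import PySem

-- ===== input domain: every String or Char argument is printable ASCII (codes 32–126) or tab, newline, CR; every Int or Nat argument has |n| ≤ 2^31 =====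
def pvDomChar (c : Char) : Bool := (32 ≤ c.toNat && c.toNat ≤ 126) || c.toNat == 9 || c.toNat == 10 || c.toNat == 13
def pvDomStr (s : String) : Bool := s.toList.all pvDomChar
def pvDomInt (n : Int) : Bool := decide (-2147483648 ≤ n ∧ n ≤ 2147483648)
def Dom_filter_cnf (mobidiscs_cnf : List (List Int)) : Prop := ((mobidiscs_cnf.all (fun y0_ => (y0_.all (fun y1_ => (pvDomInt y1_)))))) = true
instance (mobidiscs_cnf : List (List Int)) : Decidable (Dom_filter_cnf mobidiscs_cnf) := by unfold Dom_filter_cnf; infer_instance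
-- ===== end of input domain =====

-- B replaces A's all-pairs proper-subset scan by a size-ascending sweep that tests each clause
-- only against the antichain of minimal clauses found so far (objective: alternative).


-- ===== PORT A =====
-- Python's 's in seen' where seen is a set of frozensets: membership is by set equality
-- (hash-order free, so testing each stored frozenset with Set.equal is exact).
def pvA_seenMem (seen : List (PySem.Set Int)) (s : PySem.Set Int) : Bool :=
  seen.any (fun t => PySem.Set.equal t s)

-- Python's 'sj < si' on two sets: proper subset (exact: membership-based, order-free).
def pvProper (s t : PySem.Set Int) : Bool :=
  PySem.Set.issubset s t && !(PySem.Set.equal s t)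

-- inner 'for j, sj in enumerate(sets): … break' loop; returns true iff the loop broke
def pvA_inner (i : Int) (si : PySem.Set Int) : List (Int × PySem.Set Int) → Bool
  | [] => false
  | (j, sj) :: rest =>
    if j == i then pvA_inner i si rest
    else if pvProper sj si then true
    else pvA_inner i si rest

def filter_cnf (mobidiscs_cnf : List (List Int)) : List (List Int) :=
  let st := mobidiscs_cnf.foldl
    (fun (st : List (PySem.Set Int) × List (List Int)) clause =>
      let s := PySem.Set.ofList clause
      if pvA_seenMem st.1 s then st else (st.1 ++ [s], st.2 ++ [clause]))
    ([], [])
  let unique_originals := st.2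
  let sets := unique_originals.map (fun x => PySem.Set.ofList x)
  let filtered := (PySem.List.enumerate sets).foldl
    (fun acc p =>
      if pvA_inner p.1 p.2 (PySem.List.enumerate sets) then acc
      else acc ++ [PySem.List.pyGetD unique_originals p.1 []])
    []
  PySem.List.sorted2 filtered (fun c => (c.length : Int)) (fun c => c)

-- ===== PORT B =====
-- tuple(sorted(set(clause))): the canonical key of a clause
def pvKey (clause : List Int) : List Int :=
  PySem.List.sorted (PySem.Set.ofList clause) (fun x => x)

def filter_cnf_alt (mobidiscs_cnf : List (List Int)) : List (List Int) :=
  let uniq := mobidiscs_cnf.foldl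
    (fun (d : PySem.Dict (List Int) (List Int)) clause =>
      let key := pvKey clause
      if d.contains key then d else d.insert key clause)
    (PySem.Dict.mk [])
  let p := (PySem.List.sorted uniq.keys (fun k => (k.length : Int))).foldl
    (fun (st : List (List Int) × List (PySem.Set Int)) key =>
      let ks := PySem.Set.ofList key
      if st.2.any (fun ms => pvProper ms ks) then st
      else (st.1 ++ [key], st.2 ++ [ks]))
    ([], [])
  let minimal := p.1
  let mins := PySem.Set.ofList minimal
  let out := (uniq.items.filter (fun kv => PySem.Set.contains mins kv.1)).map (fun kv => kv.2)
  PySem.List.sorted2 out (fun c => (c.length : Int)) (fun c => c)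

-- ===== PRECONDITION & SPEC =====
def Spec_filter_cnf (mobidiscs_cnf : List (List Int)) (out : List (List Int)) : Prop := out = filter_cnf_alt mobidiscs_cnf
instance (mobidiscs_cnf : List (List Int)) (out : List (List Int)) : Decidable (Spec_filter_cnf mobidiscs_cnf out) := by unfold Spec_filter_cnf; infer_instance

-- ===== CLAIM (what is proved, stated in full; the proofs are below) =====
def Claim_equal_filter_cnf : Prop := ∀ (mobidiscs_cnf : List (List Int)), Dom_filter_cnf mobidiscs_cnf → Spec_filter_cnf mobidiscs_cnf (filter_cnf mobidiscs_cnf)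

-- ===== LEMMAS AND PROOFS =====

-- proper subset of the element-sets of two integer lists
abbrev pvPs (a b : List Int) : Prop := (∀ x ∈ a, x ∈ b) ∧ ¬(∀ x ∈ b, x ∈ a)

-- the shared dedup sequence: first clause of each distinct canonical key, in order
def pvU (uniq : List (List Int)) : List (List Int) → List (List Int)
  | [] => uniq
  | c :: r =>
    if uniq.any (fun u => pvKey u == pvKey c) then pvU uniq r
    else pvU (uniq ++ [c]) r

theorem mem_pvKey (c : List Int) (x : Int) : x ∈ pvKey c ↔ x ∈ c := by
  unfold pvKey
  rw [PySem.List.mem_sorted, PySem.Set.mem_ofList]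

theorem nodup_pvKey (c : List Int) : (pvKey c).Nodup :=
  ((PySem.List.sorted_perm _ _ _).nodup_iff).mpr (PySem.Set.nodup_ofList c)

theorem pvKey_eq_iff (u c : List Int) : pvKey u = pvKey c ↔ (∀ x, x ∈ u ↔ x ∈ c) := by
  constructor
  · intro h x
    rw [← mem_pvKey u x, ← mem_pvKey c x, h]
  · intro h
    unfold pvKey
    rw [PySem.List.sorted_id_eq_sorted_id_iff_perm]
    have h1 : PySem.Set.ofList u ⊆ PySem.Set.ofList c := by
      intro x hx
      rw [PySem.Set.mem_ofList] at hx ⊢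
      exact (h x).mp hx
    have h2 : PySem.Set.ofList c ⊆ PySem.Set.ofList u := by
      intro x hx
      rw [PySem.Set.mem_ofList] at hx ⊢
      exact (h x).mpr hx
    exact ((PySem.Set.nodup_ofList u).subperm h1).antisymm
      ((PySem.Set.nodup_ofList c).subperm h2)

theorem pvProper_iff (u c : List Int) :
    pvProper (PySem.Set.ofList u) (PySem.Set.ofList c) = true ↔ pvPs u c := by
  simp only [pvProper, PySem.Set.issubset, PySem.Set.equal, PySem.Set.contains,
    Bool.and_eq_true, Bool.not_eq_true', Bool.and_eq_false_iff, List.all_eq_true,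
    List.contains_iff_mem, List.all_eq_false, pvPs]
  constructor
  · rintro ⟨hsub, hne⟩
    refine ⟨fun x hx => ?_, fun hba => ?_⟩
    · rw [← PySem.Set.mem_ofList u x, ← PySem.Set.mem_ofList c x] at *
      exact hsub x hx
    · rcases hne with h | h
      · rcases h with ⟨x, hx, hx2⟩
        exact hx2 (hsub x hx)
      · rcases h with ⟨x, hx, hx2⟩
        rw [PySem.Set.mem_ofList] at hx
        rw [PySem.Set.mem_ofList] at hx2
        exact hx2 (hba x hx)
  · rintro ⟨hsub, hne⟩
    refine ⟨fun x hx => ?_, Or.inr ?_⟩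
    · rw [PySem.Set.mem_ofList] at hx ⊢
      exact hsub x hx
    · push Not at hne
      rcases hne with ⟨x, hx, hx2⟩
      refine ⟨x, ?_, ?_⟩
      · rw [PySem.Set.mem_ofList]; exact hx
      · rw [PySem.Set.mem_ofList]; exact hx2

theorem pvPs_key_iff (u c : List Int) : pvPs (pvKey u) (pvKey c) ↔ pvPs u c := by
  unfold pvPs
  constructor
  · rintro ⟨h1, h2⟩
    refine ⟨fun x hx => ?_, fun hba => h2 fun x hx => ?_⟩
    · rw [← mem_pvKey c]; exact h1 x ((mem_pvKey u x).mpr hx)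
    · rw [mem_pvKey] at hx ⊢; exact hba x hx
  · rintro ⟨h1, h2⟩
    refine ⟨fun x hx => ?_, fun hba => h2 fun x hx => ?_⟩
    · rw [mem_pvKey] at hx ⊢; exact h1 x hx
    · rw [← mem_pvKey u]; exact hba x ((mem_pvKey c x).mpr hx)

theorem pvPs_irrefl (c : List Int) : ¬ pvPs c c := fun h => h.2 fun x hx => hx

theorem pvPs_len_lt {a b : List Int} (ha : a.Nodup) (hb : b.Nodup) (h : pvPs a b) :
    a.length < b.length := by
  rcases h with ⟨hsub, hne⟩
  push Not at hne
  rcases hne with ⟨x, hx, hx2⟩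
  rw [← List.toFinset_card_of_nodup ha, ← List.toFinset_card_of_nodup hb]
  apply Finset.card_lt_card
  constructor
  · intro y hy
    rw [List.mem_toFinset] at hy ⊢
    exact hsub y hy
  · intro hcon
    exact hx2 (List.mem_toFinset.mp (hcon (List.mem_toFinset.mpr hx)))

theorem pvPs_sub_trans {a b c : List Int} (h1 : ∀ x ∈ a, x ∈ b) (h2 : pvPs b c) : pvPs a c :=
  ⟨fun x hx => h2.1 x (h1 x hx), fun hca => h2.2 fun x hx => h1 x (hca x hx)⟩

-- every clause of ks has a pvPs-minimal (sub)clause in ks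
theorem pv_exists_min (ks : List (List Int)) (hn : ∀ k ∈ ks, k.Nodup) :
    ∀ k ∈ ks, ∃ m ∈ ks, (¬ ∃ k' ∈ ks, pvPs k' m) ∧ (∀ x ∈ m, x ∈ k) := by
  have main : ∀ n : Nat, ∀ k ∈ ks, k.length ≤ n →
      ∃ m ∈ ks, (¬ ∃ k' ∈ ks, pvPs k' m) ∧ (∀ x ∈ m, x ∈ k) := by
    intro n
    induction n with
    | zero =>
      intro k hk hlen
      by_cases hmin : ∃ k' ∈ ks, pvPs k' k
      · rcases hmin with ⟨k', hk', hps⟩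
        have := pvPs_len_lt (hn k' hk') (hn k hk) hps
        omega
      · exact ⟨k, hk, hmin, fun x hx => hx⟩
    | succ n ih =>
      intro k hk hlen
      by_cases hmin : ∃ k' ∈ ks, pvPs k' k
      · rcases hmin with ⟨k', hk', hps⟩
        have hlt := pvPs_len_lt (hn k' hk') (hn k hk) hps
        rcases ih k' hk' (by omega) with ⟨m, hm, hmmin, hmsub⟩
        exact ⟨m, hm, hmmin, fun x hx => hps.1 x (hmsub x hx)⟩
      · exact ⟨k, hk, hmin, fun x hx => hx⟩
  intro k hk
  exact main k.length k hk le_rfl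


-- Python's frozenset equality versus the canonical key
theorem equal_eq_key (u c : List Int) :
    PySem.Set.equal (PySem.Set.ofList u) (PySem.Set.ofList c) = (pvKey u == pvKey c) := by
  rw [Bool.eq_iff_iff, beq_iff_eq, pvKey_eq_iff]
  simp only [PySem.Set.equal, PySem.Set.issubset, PySem.Set.contains, Bool.and_eq_true,
    List.all_eq_true, List.contains_iff_mem]
  constructor
  · rintro ⟨h1, h2⟩ x
    constructor
    · intro hx
      have := h1 x ((PySem.Set.mem_ofList u x).mpr hx)
      exact (PySem.Set.mem_ofList c x).mp this
    · intro hx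
      have := h2 x ((PySem.Set.mem_ofList c x).mpr hx)
      exact (PySem.Set.mem_ofList u x).mp this
  · intro h
    constructor
    · intro x hx
      rw [PySem.Set.mem_ofList] at hx ⊢
      exact (h x).mp hx
    · intro x hx
      rw [PySem.Set.mem_ofList] at hx ⊢
      exact (h x).mpr hx

-- A's dedup loop lands on pvU
theorem dedupA (cnf : List (List Int)) : ∀ uniq : List (List Int),
    cnf.foldl
      (fun (st : List (PySem.Set Int) × List (List Int)) clause =>
        let s := PySem.Set.ofList clause
        if pvA_seenMem st.1 s then st else (st.1 ++ [s], st.2 ++ [clause]))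
      (uniq.map (fun c => PySem.Set.ofList c), uniq)
    = ((pvU uniq cnf).map (fun c => PySem.Set.ofList c), pvU uniq cnf) := by
  induction cnf with
  | nil => intro uniq; simp [pvU]
  | cons c r ih =>
    intro uniq
    have hguard : pvA_seenMem (uniq.map (fun c => PySem.Set.ofList c)) (PySem.Set.ofList c)
        = uniq.any (fun u => pvKey u == pvKey c) := by
      unfold pvA_seenMem
      rw [List.any_map]
      congr 1
      funext u
      exact equal_eq_key u c
    simp only [List.foldl_cons, pvU, hguard]
    by_cases h : uniq.any (fun u => pvKey u == pvKey c) = true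
    · simp only [h, ite_true]
      exact ih uniq
    · rw [Bool.not_eq_true] at h
      simp only [h, Bool.false_eq_true, ite_false]
      have := ih (uniq ++ [c])
      rw [← this]
      simp

-- B's dedup loop lands on pvU too
theorem dedupB (cnf : List (List Int)) : ∀ uniq : List (List Int),
    cnf.foldl
      (fun (d : PySem.Dict (List Int) (List Int)) clause =>
        let key := pvKey clause
        if d.contains key then d else d.insert key clause)
      (PySem.Dict.mk (uniq.map (fun c => (pvKey c, c))))
    = PySem.Dict.mk ((pvU uniq cnf).map (fun c => (pvKey c, c))) := by
  induction cnf with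
  | nil => intro uniq; simp [pvU]
  | cons c r ih =>
    intro uniq
    have hguard : (PySem.Dict.mk (uniq.map (fun c => (pvKey c, c)))).contains (pvKey c)
        = uniq.any (fun u => pvKey u == pvKey c) := by
      simp only [PySem.Dict.contains, PySem.Dict.items, List.any_map]
      rfl
    simp only [List.foldl_cons, pvU, hguard]
    by_cases h : uniq.any (fun u => pvKey u == pvKey c) = true
    · simp only [h, ite_true]
      exact ih uniq
    · rw [Bool.not_eq_true] at h
      simp only [h, Bool.false_eq_true, ite_false]
      have hins : (PySem.Dict.mk (uniq.map (fun c => (pvKey c, c)))).insert (pvKey c) c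
          = PySem.Dict.mk ((uniq ++ [c]).map (fun c => (pvKey c, c))) := by
        simp only [PySem.Dict.insert, hguard, h, Bool.false_eq_true, ite_false, List.map_append,
          List.map_cons, List.map_nil]
      rw [hins]
      exact ih (uniq ++ [c])

-- the inner break loop finds an index j ≠ i with sets[j] a proper subset of si
theorem inner_spec (i : Int) (si : PySem.Set Int) :
    ∀ (L : List (PySem.Set Int)) (k : Int),
      pvA_inner i si (PySem.List.enumerate L k) = true
      ↔ ∃ m : Nat, ∃ _ : m < L.length, (k + m : Int) ≠ i ∧ pvProper L[m] si = true := by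
  intro L
  induction L with
  | nil => intro k; simp [PySem.List.enumerate, pvA_inner]
  | cons x t ih =>
    intro k
    rw [PySem.List.enumerate_cons]
    unfold pvA_inner
    by_cases hk : (k == i) = true
    · rw [if_pos hk, ih (k + 1)]
      rw [beq_iff_eq] at hk
      subst hk
      constructor
      · rintro ⟨m, hm, hne, hp⟩
        refine ⟨m + 1, by simpa using hm, by omega, by simpa using hp⟩
      · rintro ⟨m, hm, hne, hp⟩
        match m with
        | 0 => omega
        | m + 1 =>
          refine ⟨m, by simpa using hm, by omega, by simpa using hp⟩
    · rw [if_neg (by simpa using hk)]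
      rw [beq_iff_eq] at hk
      by_cases hp : pvProper x si = true
      · rw [if_pos hp]
        simp only [true_iff]
        exact ⟨0, by simp, by simpa using hk, by simpa using hp⟩
      · rw [if_neg hp, ih (k + 1)]
        constructor
        · rintro ⟨m, hm, hne, hpp⟩
          refine ⟨m + 1, by simpa using hm, by omega, by simpa using hpp⟩
        · rintro ⟨m, hm, hne, hpp⟩
          match m with
          | 0 => exact absurd (by simpa using hpp) hp
          | m + 1 =>
            refine ⟨m, by simpa using hm, by omega, by simpa using hpp⟩

-- B's sweep over the size-sorted keys computes exactly the pvPs-minimal keys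
theorem fold_min (keys : List (List Int)) (hkn : ∀ k ∈ keys, k.Nodup) :
    (PySem.List.sorted keys (fun k => (k.length : Int))).foldl
      (fun (st : List (List Int) × List (PySem.Set Int)) key =>
        let ks := PySem.Set.ofList key
        if st.2.any (fun ms => pvProper ms ks) then st
        else (st.1 ++ [key], st.2 ++ [ks]))
      ([], [])
    = ((PySem.List.sorted keys (fun k => (k.length : Int))).filter
        (fun k => !decide (∃ k' ∈ keys, pvPs k' k)),
       ((PySem.List.sorted keys (fun k => (k.length : Int))).filter
        (fun k => !decide (∃ k' ∈ keys, pvPs k' k))).map (fun k => PySem.Set.ofList k)) := by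
  set sk := PySem.List.sorted keys (fun k => (k.length : Int)) with hsk
  set q : List Int → Bool := fun k => !decide (∃ k' ∈ keys, pvPs k' k) with hq
  have hperm : sk.Perm keys := PySem.List.sorted_perm keys _ _
  have hpw : sk.Pairwise (fun a b => (a.length : Int) ≤ (b.length : Int)) :=
    PySem.List.sorted_pairwise keys _
  have hguard : ∀ pre key suf, sk = pre ++ key :: suf →
      (((pre.filter q).map (fun k => PySem.Set.ofList k)).any
          (fun ms => pvProper ms (PySem.Set.ofList key)))
        = !q key := by
    intro pre key suf hsplit
    rw [List.any_map]
    rw [Bool.eq_iff_iff]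
    simp only [hq, Bool.not_not, List.any_eq_true, List.mem_filter, decide_eq_true_eq,
      Function.comp]
    constructor
    · rintro ⟨m, ⟨hmpre, _⟩, hp⟩
      have hmk : m ∈ keys := hperm.mem_iff.mp (by rw [hsplit]; exact List.mem_append_left _ hmpre)
      exact ⟨m, hmk, (pvProper_iff m key).mp hp⟩
    · rintro ⟨k', hk', hps⟩
      rcases pv_exists_min keys hkn k' hk' with ⟨m, hmk, hmmin, hmsub⟩
      have hpsm : pvPs m key := pvPs_sub_trans hmsub hps
      have hmlen : m.length < key.length :=
        pvPs_len_lt (hkn m hmk)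
          (hkn key (hperm.mem_iff.mp (by rw [hsplit]; exact List.mem_append_right _ List.mem_cons_self))) hpsm
      have hmsk : m ∈ sk := hperm.mem_iff.mpr hmk
      rw [hsplit] at hmsk
      have hmpre : m ∈ pre := by
        rcases List.mem_append.mp hmsk with h | h
        · exact h
        · rcases List.mem_cons.mp h with h | h
          · subst h; omega
          · exfalso
            rw [hsplit] at hpw
            rcases List.pairwise_append.mp hpw with ⟨_, hpw2, _⟩
            have := (List.pairwise_cons.mp hpw2).1 m h
            omega
      exact ⟨m, ⟨hmpre, by simpa using hmmin⟩, (pvProper_iff m key).mpr hpsm⟩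
  have main : ∀ suf pre, sk = pre ++ suf →
      suf.foldl
        (fun (st : List (List Int) × List (PySem.Set Int)) key =>
          let ks := PySem.Set.ofList key
          if st.2.any (fun ms => pvProper ms ks) then st
          else (st.1 ++ [key], st.2 ++ [ks]))
        (pre.filter q, (pre.filter q).map (fun k => PySem.Set.ofList k))
      = ((pre ++ suf).filter q, ((pre ++ suf).filter q).map (fun k => PySem.Set.ofList k)) := by
    intro suf
    induction suf with
    | nil => intro pre h; simp
    | cons key rest ih =>
      intro pre hsplit
      simp only [List.foldl_cons]
      have hg := hguard pre key rest hsplit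
      by_cases hqk : q key = true
      · rw [hg, hqk]
        simp only [Bool.not_true, Bool.false_eq_true, ite_false]
        have hstep : pre.filter q ++ [key] = (pre ++ [key]).filter q := by
          rw [List.filter_append]
          simp [hqk]
        have hstep2 : (pre.filter q).map (fun k => PySem.Set.ofList k) ++ [PySem.Set.ofList key]
            = ((pre ++ [key]).filter q).map (fun k => PySem.Set.ofList k) := by
          rw [← hstep, List.map_append]
          rfl
        rw [hstep, hstep2]
        have := ih (pre ++ [key]) (by rw [hsplit]; simp)
        rw [this]
        simp
      · rw [hg, Bool.not_eq_true] at *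
        rw [hqk]
        simp only [Bool.not_false, ite_true]
        have hstep : pre.filter q = (pre ++ [key]).filter q := by
          rw [List.filter_append]
          simp [hqk]
        rw [hstep]
        have := ih (pre ++ [key]) (by rw [hsplit]; simp)
        rw [this]
        simp
  have := main sk [] rfl
  simpa using this

-- A's outer loop is a filter of the deduped originals
theorem outer_eq (U : List (List Int)) :
    (PySem.List.enumerate (U.map (fun x => PySem.Set.ofList x))).foldl
      (fun acc p =>
        if pvA_inner p.1 p.2 (PySem.List.enumerate (U.map (fun x => PySem.Set.ofList x))) then acc
        else acc ++ [PySem.List.pyGetD U p.1 []])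
      []
    = U.filter (fun c => !decide (∃ u ∈ U, pvPs u c)) := by
  set E := PySem.List.enumerate (U.map (fun x => PySem.Set.ofList x)) with hE
  have hflip : (fun (acc : List (List Int)) (p : Int × PySem.Set Int) =>
      if pvA_inner p.1 p.2 E then acc else acc ++ [PySem.List.pyGetD U p.1 []])
      = (fun acc p =>
        if (!pvA_inner p.1 p.2 E) = true then acc ++ [PySem.List.pyGetD U p.1 []] else acc) := by
    funext acc p
    cases h : pvA_inner p.1 p.2 E <;> simp [h]
  rw [hflip, PySem.List.foldl_append_if]
  rw [List.nil_append]
  -- now: map over the filtered enumerate equals the value-level filter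
  have aux : ∀ (V : List (List Int)) (k : Nat), V = U.drop k →
      ((PySem.List.enumerate (V.map (fun x => PySem.Set.ofList x)) (k : Int)).filter
          (fun p => !pvA_inner p.1 p.2 E)).map (fun p => PySem.List.pyGetD U p.1 [])
      = V.filter (fun c => !decide (∃ u ∈ U, pvPs u c)) := by
    intro V
    induction V with
    | nil => intro k h; simp [PySem.List.enumerate]
    | cons c rest ih =>
      intro k hdrop
      have hk : U[k]? = some c := by
        have : (U.drop k)[0]? = some c := by rw [← hdrop]; rfl
        rwa [List.getElem?_drop, Nat.add_zero] at this
      have hklt : k < U.length := by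
        rcases List.getElem?_eq_some_iff.mp hk with ⟨h, _⟩
        exact h
      have hkc : U[k] = c := by
        have h2 := List.getElem?_eq_getElem hklt
        rw [hk] at h2
        exact (Option.some_inj.mp h2).symm
      have hrest : rest = U.drop (k + 1) := by
        have : List.drop 1 (U.drop k) = List.drop (k + 1) U := by
          rw [List.drop_drop]
        rw [← this, ← hdrop]
        rfl
      simp only [List.map_cons, PySem.List.enumerate_cons, List.filter_cons]
      -- the head's guard equals the value-level guard
      have hinner : pvA_inner (k : Int) (PySem.Set.ofList c) E
          = decide (∃ u ∈ U, pvPs u c) := by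
        rw [Bool.eq_iff_iff, decide_eq_true_eq]
        rw [hE, inner_spec]
        constructor
        · rintro ⟨m, hm, hne, hp⟩
          rw [List.length_map] at hm
          have : (U.map (fun x => PySem.Set.ofList x))[m] = PySem.Set.ofList U[m] := by
            simp
          rw [this] at hp
          exact ⟨U[m], List.getElem_mem _, (pvProper_iff _ _).mp hp⟩
        · rintro ⟨u, hu, hps⟩
          rcases List.mem_iff_getElem.mp hu with ⟨m, hm, hum⟩
          refine ⟨m, by simpa using hm, ?_, ?_⟩
          · intro hcon
            have hmk : m = k := by omega
            subst hmk
            rw [hkc] at hum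
            subst hum
            exact pvPs_irrefl _ hps
          · have : (U.map (fun x => PySem.Set.ofList x))[m]'(by simpa using hm)
                = PySem.Set.ofList U[m] := by simp
            rw [this, hum]
            exact (pvProper_iff _ _).mpr hps
      by_cases hbad : decide (∃ u ∈ U, pvPs u c) = true
      · simp only [hinner, hbad, Bool.not_true, Bool.false_eq_true, ite_false]
        rw [ih (k + 1) hrest |>.symm]
        norm_num
      · rw [Bool.not_eq_true] at hbad
        simp only [hinner, hbad, Bool.not_false, ite_true, List.map_cons]
        have hget : PySem.List.pyGetD U (k : Int) [] = c := by
          rw [PySem.List.pyGetD_natCast, List.getD_eq_getElem?_getD, hk]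
          rfl
        rw [hget]
        have := ih (k + 1) hrest
        norm_num at this ⊢
        rw [← this]
  have h0 : U = U.drop 0 := rfl
  have := aux U 0 h0
  rw [hE] at this ⊢
  simpa using this


theorem A_eq (cnf : List (List Int)) :
    filter_cnf cnf
    = PySem.List.sorted2
        ((pvU [] cnf).filter (fun c => !decide (∃ u ∈ pvU [] cnf, pvPs u c)))
        (fun c => (c.length : Int)) (fun c => c) := by
  unfold filter_cnf
  have hA := dedupA cnf []
  simp only [List.map_nil] at hA
  rw [hA]
  dsimp only
  rw [outer_eq (pvU [] cnf)]

theorem B_eq (cnf : List (List Int)) :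
    filter_cnf_alt cnf
    = PySem.List.sorted2
        ((pvU [] cnf).filter (fun c => !decide (∃ u ∈ pvU [] cnf, pvPs u c)))
        (fun c => (c.length : Int)) (fun c => c) := by
  unfold filter_cnf_alt
  have hB := dedupB cnf []
  simp only [List.map_nil] at hB
  rw [hB]
  dsimp only
  set U := pvU [] cnf with hU
  have hkeys : (PySem.Dict.mk (U.map (fun c => (pvKey c, c)))).keys = U.map pvKey := by
    rw [PySem.Dict.keys_mk, List.map_map]
    rfl
  have hkn : ∀ k ∈ U.map pvKey, k.Nodup := by
    intro k hk
    rcases List.mem_map.mp hk with ⟨u, _, rfl⟩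
    exact nodup_pvKey u
  rw [hkeys, fold_min (U.map pvKey) hkn]
  dsimp only
  set sk := PySem.List.sorted (U.map pvKey) (fun k => (k.length : Int)) with hsk
  set q' : List Int → Bool := fun k => !decide (∃ k' ∈ U.map pvKey, pvPs k' k) with hq'
  rw [List.filter_map]
  have hcong : U.filter
        ((fun kv : List Int × List Int => PySem.Set.contains (PySem.Set.ofList (sk.filter q')) kv.1)
          ∘ (fun c => (pvKey c, c)))
      = U.filter (fun c => !decide (∃ u ∈ U, pvPs u c)) := by
    apply List.filter_congr
    intro c hc
    simp only [Function.comp]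
    have hmemsk : pvKey c ∈ sk := by
      rw [hsk, PySem.List.mem_sorted]
      exact List.mem_map_of_mem hc
    rw [Bool.eq_iff_iff]
    have hLHS : (PySem.Set.contains (PySem.Set.ofList (sk.filter q')) (pvKey c) = true)
        ↔ pvKey c ∈ sk.filter q' := by
      simp only [PySem.Set.contains, List.contains_iff_mem]
      exact PySem.Set.mem_ofList _ _
    rw [hLHS, List.mem_filter]
    constructor
    · rintro ⟨_, hq⟩
      simp only [hq', Bool.not_eq_true', decide_eq_false_iff_not] at hq
      simp only [Bool.not_eq_true', decide_eq_false_iff_not]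
      rintro ⟨u, hu, hps⟩
      exact hq ⟨pvKey u, List.mem_map_of_mem hu, (pvPs_key_iff u c).mpr hps⟩
    · intro h
      simp only [Bool.not_eq_true', decide_eq_false_iff_not] at h
      refine ⟨hmemsk, ?_⟩
      simp only [hq', Bool.not_eq_true', decide_eq_false_iff_not]
      rintro ⟨k', hk', hps⟩
      rcases List.mem_map.mp hk' with ⟨u, hu, rfl⟩
      exact h ⟨u, hu, (pvPs_key_iff u c).mp hps⟩
  rw [hcong, List.map_map]
  have hid : ((fun kv : List Int × List Int => kv.2) ∘ (fun c => (pvKey c, c))) = id := rfl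
  rw [hid, List.map_id]

-- ===== VERDICT (by name: the statement is the Claim_ definition above) =====
theorem filter_cnf_spec : Claim_equal_filter_cnf := by
  intro cnf _
  unfold Spec_filter_cnf
  rw [A_eq, B_eq]
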